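-- pv_equiv track=rewrite | github.com/Wundrfull/godauto | src/gdauto/formats/uid.py | uid_to_text
-- ===== SOURCE A (Python) =====
-- CHARS = "abcdefghijklmnopqrstuvwxy012345678"
--
-- BASE = len(CHARS)  # 34
--
-- def uid_to_text(uid: int) -> str:
--     """Convert numeric UID to uid:// text format.
--
--     Prepends each digit (LSB computed first, placed at right), matching
--     Godot's id_to_text algorithm where the result string is built by
--     prepending characters. Returns "uid://<invalid>" for negative values.
--     """
--     if uid < 0:
--         return "uid://<invalid>"
--     result = ""
--     value = uid
--     while True:
--         result = CHARS[value % BASE] + result  # prepend, not append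
--         value //= BASE
--         if value == 0:
--             break
--     return "uid://" + result
-- ===== SOURCE B (Python) =====
-- CHARS = "abcdefghijklmnopqrstuvwxy012345678"
--
-- BASE = len(CHARS)  # 34
--
-- def _digits(n):
--     # most-significant digit first
--     if n < BASE:
--         return CHARS[n]
--     return _digits(n // BASE) + CHARS[n % BASE]
--
-- def uid_to_text(uid: int) -> str:
--     if uid < 0:
--         return "uid://<invalid>"
--     return "uid://" + _digits(uid)
-- ===== Notes on version B (the rewrite author's own statement) =====
-- stated objective: alternative
-- what changed: Replaces A's LSB-first while loop that prepends digits onto an accumulator string with a recursive helper that emits digits MSB-first by natural concatenation (digits(n//BASE) + CHARS[n%BASE]).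
import Mathlib
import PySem

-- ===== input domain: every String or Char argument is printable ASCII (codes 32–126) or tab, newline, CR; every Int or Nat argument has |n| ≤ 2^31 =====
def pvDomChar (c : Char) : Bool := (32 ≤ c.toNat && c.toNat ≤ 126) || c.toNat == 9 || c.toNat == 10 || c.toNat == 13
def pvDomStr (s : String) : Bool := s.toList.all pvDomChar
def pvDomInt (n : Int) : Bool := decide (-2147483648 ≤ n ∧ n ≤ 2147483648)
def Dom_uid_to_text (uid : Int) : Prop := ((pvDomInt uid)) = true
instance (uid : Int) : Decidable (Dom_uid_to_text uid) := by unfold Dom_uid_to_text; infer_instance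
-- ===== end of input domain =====

-- B replaces A's LSB-first prepend loop with an MSB-first recursive helper; same values, no speed claim.

-- ===== PORT A =====
def pvCHARS : List Char := "abcdefghijklmnopqrstuvwxy012345678".toList

-- A's while-loop: prepend CHARS[value % 34], value //= 34, stop when value = 0.
-- The hypothesis 0 ≤ value only justifies termination; the computation is A's.
def pvLoopA (value : Int) (result : List Char) (h : 0 ≤ value) : List Char :=
  let result' := PySem.List.pyGetD pvCHARS (PySem.Int.mod value 34) 'a' :: result
  let value' := PySem.Int.floordiv value 34
  if hv : value' = 0 then result'
  else pvLoopA value' result' (by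
    show 0 ≤ PySem.Int.floordiv value 34
    rw [PySem.Int.floordiv_eq_ediv_of_pos (by omega)]; omega)
termination_by value.toNat
decreasing_by
  show (PySem.Int.floordiv value 34).toNat < value.toNat
  rw [PySem.Int.floordiv_eq_ediv_of_pos (show (0:Int) < 34 by omega)]
  rw [show value' = PySem.Int.floordiv value 34 from rfl,
      PySem.Int.floordiv_eq_ediv_of_pos (show (0:Int) < 34 by omega)] at hv
  omega

def uid_to_text (uid : Int) : String :=
  if h : uid < 0 then "uid://<invalid>"
  else String.ofList ("uid://".toList ++ pvLoopA uid [] (by omega))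

-- ===== PORT B =====
-- B's recursive helper: digits of n, most-significant first.
def pvDigitsB (n : Int) (h : 0 ≤ n) : List Char :=
  if hn : n < 34 then [PySem.List.pyGetD pvCHARS n 'a']
  else pvDigitsB (PySem.Int.floordiv n 34) (by
        rw [PySem.Int.floordiv_eq_ediv_of_pos (by omega)]; omega)
      ++ [PySem.List.pyGetD pvCHARS (PySem.Int.mod n 34) 'a']
termination_by n.toNat
decreasing_by
  simp only [PySem.Int.floordiv_eq_ediv_of_pos (show (0:Int) < 34 by omega)]
  omega

def uid_to_text_alt (uid : Int) : String :=
  if h : uid < 0 then "uid://<invalid>"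
  else String.ofList ("uid://".toList ++ pvDigitsB uid (by omega))

-- ===== PRECONDITION & SPEC =====
def Spec_uid_to_text (uid : Int) (out : String) : Prop := out = uid_to_text_alt uid
instance (uid : Int) (out : String) : Decidable (Spec_uid_to_text uid out) := by unfold Spec_uid_to_text; infer_instance

-- ===== CLAIM (what is proved, stated in full; the proofs are below) =====
def Claim_equal_uid_to_text : Prop := ∀ (uid : Int), Dom_uid_to_text uid → Spec_uid_to_text uid (uid_to_text uid)

-- ===== LEMMAS AND PROOFS =====
theorem pvLoop_eq_digits (k : Nat) (v : Int) (hv : 0 ≤ v) (hk : v.toNat ≤ k) (acc : List Char) :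
    pvLoopA v acc hv = pvDigitsB v hv ++ acc := by
  induction k generalizing v acc with
  | zero =>
      have hv0 : v = 0 := by omega
      subst hv0
      rw [pvLoopA.eq_def, pvDigitsB.eq_def]
      simp [PySem.Int.mod, PySem.Int.floordiv]
  | succ k ih =>
      rw [pvLoopA.eq_def, pvDigitsB.eq_def]
      by_cases h34 : v < 34
      · have hq : PySem.Int.floordiv v 34 = 0 := by
          rw [PySem.Int.floordiv_eq_ediv_of_pos (by omega)]; omega
        have hm : PySem.Int.mod v 34 = v := by
          rw [PySem.Int.mod_eq_emod_of_pos (by omega)]; omega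
        simp only [hq, hm]
        simp [h34]
      · have hq0 : 0 < PySem.Int.floordiv v 34 := by
          rw [PySem.Int.floordiv_eq_ediv_of_pos (by omega)]; omega
        have hlt : (PySem.Int.floordiv v 34).toNat ≤ k := by
          rw [PySem.Int.floordiv_eq_ediv_of_pos (by omega)] at hq0 ⊢
          omega
        simp only [dif_neg (by omega : ¬ PySem.Int.floordiv v 34 = 0),
                   dif_neg h34]
        rw [ih _ _ hlt]
        simp

theorem uid_to_text_spec : Claim_equal_uid_to_text := by
  intro uid _
  unfold Spec_uid_to_text uid_to_text uid_to_text_alt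
  by_cases h : uid < 0
  · simp [h]
  · simp only [dif_neg h]
    rw [pvLoop_eq_digits uid.toNat uid (by omega) (le_refl _)]
    simp
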